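-- pv_equiv track=rewrite | github.com/nasa/fmdtools | fmdtools/analyze/common.py | auto_filetype
-- ===== SOURCE A (Python) =====
-- def auto_filetype(filename, filetype="", filetypes=['npz', 'csv', 'json']):
--     """
--     Automatically determine the filetype (npz, csv, or json) of a filename.
--
--     Examples
--     --------
--     >>> auto_filetype("hi.npz")
--     'npz'
--     >>> auto_filetype("example.csv")
--     'csv'
--     >>> auto_filetype("example.json")
--     'json'
--     >>> auto_filetype("x.pdf")
--     Traceback (most recent call last):
--       ...
--     Exception: Invalid filename in x.pdf, ensure extension is in ['npz', 'csv', 'json'].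
--     >>> auto_filetype("no_ext", "csv")
--     'csv'
--     """
--     if not filetype:
--         if '.' not in filename:
--             raise Exception("No file extension in: " + filename)
--         for ft in filetypes:
--             len_ft = len(ft)
--             if filename[-(len_ft+1):] == '.'+ft:
--                 filetype = ft
--                 break
--         if not filetype:
--             raise Exception("Invalid filename in " + filename +
--                             ", ensure extension is in "+str(filetypes)+".")
--     return filetype
-- ===== SOURCE B (Python) =====
-- def auto_filetype(filename, filetype="", filetypes=['npz', 'csv', 'json']):
--     """Invert the search: collect every dot-suffix of the filename once, then
--     pick among the matching candidates the one of minimal index in filetypes."""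
--     if not filetype:
--         if '.' not in filename:
--             raise Exception("No file extension in: " + filename)
--         candidates = [filename[i+1:] for i, c in enumerate(filename) if c == '.']
--         best = min((filetypes.index(ext) for ext in candidates if ext in filetypes),
--                    default=None)
--         if best is not None:
--             filetype = filetypes[best]
--         if not filetype:
--             raise Exception("Invalid filename in " + filename +
--                             ", ensure extension is in " + str(filetypes) + ".")
--     return filetype
-- ===== Notes on version B (the rewrite author's own statement) =====
-- stated objective: alternative
-- what changed: B inverts the traversal: instead of scanning each candidate filetype and testing it as a dot-suffix of the filename, it collects the filename's dot-suffixes once and selects the matching candidate of minimal index in filetypes.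
import Mathlib
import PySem

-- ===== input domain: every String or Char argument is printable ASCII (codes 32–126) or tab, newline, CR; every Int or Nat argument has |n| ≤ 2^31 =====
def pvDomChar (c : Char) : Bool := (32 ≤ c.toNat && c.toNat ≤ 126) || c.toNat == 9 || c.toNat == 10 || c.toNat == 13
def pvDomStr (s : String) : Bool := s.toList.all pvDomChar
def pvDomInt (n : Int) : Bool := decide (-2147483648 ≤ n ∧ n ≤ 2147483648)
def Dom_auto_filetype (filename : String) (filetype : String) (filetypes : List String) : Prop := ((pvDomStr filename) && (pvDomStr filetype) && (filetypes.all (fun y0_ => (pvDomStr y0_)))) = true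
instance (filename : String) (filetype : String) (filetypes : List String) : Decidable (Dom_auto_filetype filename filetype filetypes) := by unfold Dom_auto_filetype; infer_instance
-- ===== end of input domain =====

-- B replaces A's per-candidate suffix scan by collecting the filename's dot-suffixes once and
-- taking the candidate of minimal index among them (objective: alternative traversal; return value only).

-- ===== PORT A =====
-- the 'for ft in filetypes: … break' loop; "" encodes 'no (truthy) match', on which A raises
def autoFtLoop (filename : List Char) : List String → String
  | [] => ""
  | ft :: rest =>
      -- len_ft = len(ft); filename[-(len_ft+1):] == '.'+ft
      if PySem.List.slice filename (some (-(PySem.Str.len ft + 1))) none = '.' :: ft.toList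
      then ft
      else autoFtLoop filename rest

def auto_filetype (filename : String) (filetype : String) (filetypes : List String) : String :=
  if filetype = "" then
    if PySem.Str.isIn "." filename = false then ""   -- Python: raise "No file extension in: …"
    else
      let ft := autoFtLoop filename.toList filetypes
      if ft = "" then ""                              -- Python: raise "Invalid filename in …"
      else ft
  else filetype

-- ===== PORT B =====
-- candidates = [filename[i+1:] for i, c in enumerate(filename) if c == '.']
def autoCands (s : List Char) : List (List Char) :=
  (PySem.List.enumerate s).filterMap
    (fun ic => if ic.2 = '.' then some (PySem.List.slice s (some (ic.1 + 1)) none) else none)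

-- min((filetypes.index(ext) for ext in candidates if ext in filetypes), default=None)
def autoBest (filetypes : List String) (cands : List (List Char)) : Option Nat :=
  (cands.filterMap (fun ext =>
      if String.ofList ext ∈ filetypes then PySem.List.index? filetypes (String.ofList ext)
      else none)).min?

def auto_filetype_alt (filename : String) (filetype : String) (filetypes : List String) : String :=
  if filetype = "" then
    if PySem.Str.isIn "." filename = false then ""   -- Python: raise "No file extension in: …"
    else
      let ft :=
        match autoBest filetypes (autoCands filename.toList) with
        | some i => filetypes.getD i ""               -- filetype = filetypes[best]
        | none => filetype                            -- best is None: filetype stays ""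
      if ft = "" then ""                              -- Python: raise "Invalid filename in …"
      else ft
  else filetype

-- ===== PRECONDITION & SPEC =====
-- Pre_ admits exactly the inputs on which Python A returns, excluding both raise branches:
-- either a non-empty filetype was supplied, or the filename contains a dot and the first
-- candidate whose dot-suffix matches the filename is itself non-empty (a match of an empty
-- candidate still leaves the filetype variable falsy, so A raises there too).
def Pre_auto_filetype (filename : String) (filetype : String) (filetypes : List String) : Prop :=
  filetype ≠ "" ∨
    (PySem.Str.isIn "." filename = true ∧
     ∃ i < filetypes.length,
       filetypes.getD i "" ≠ "" ∧
       PySem.Str.endswith filename ("." ++ filetypes.getD i "") = true ∧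
       ∀ j < i, PySem.Str.endswith filename ("." ++ filetypes.getD j "") = false)
instance (filename : String) (filetype : String) (filetypes : List String) : Decidable (Pre_auto_filetype filename filetype filetypes) := by unfold Pre_auto_filetype; infer_instance

def pvWitness_auto_filetype : String × String × List String := ("hi.npz", "", ["npz", "csv", "json"])

def Spec_auto_filetype (filename : String) (filetype : String) (filetypes : List String) (out : String) : Prop := out = auto_filetype_alt filename filetype filetypes
instance (filename : String) (filetype : String) (filetypes : List String) (out : String) : Decidable (Spec_auto_filetype filename filetype filetypes out) := by unfold Spec_auto_filetype; infer_instance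

-- ===== CLAIM (what is proved, stated in full; the proofs are below) =====
def Claim_equal_auto_filetype : Prop := ∀ (filename : String) (filetype : String) (filetypes : List String), Dom_auto_filetype filename filetype filetypes → Pre_auto_filetype filename filetype filetypes → Spec_auto_filetype filename filetype filetypes (auto_filetype filename filetype filetypes)

-- ===== LEMMAS AND PROOFS =====

-- A's slice comparison 'filename[-(len(ft)+1):] == "."+ft' is exactly the suffix test.
theorem slice_neg_eq_iff (L t : List Char) (ht : t ≠ []) :
    PySem.List.slice L (some (-(t.length : Int))) none = t ↔ t <:+ L := by
  have hm : 0 < t.length := List.length_pos_iff.mpr ht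
  simp only [PySem.List.slice, PySem.List.clampIdx]
  rcases Nat.lt_or_ge t.length (L.length+1) with h | h
  · have hneg : -(t.length : Int) < 0 := by omega
    rw [if_pos hneg, if_neg (by omega)]
    have : ((L.length : Int) + -(t.length)).toNat = L.length - t.length := by omega
    rw [this]
    rw [List.take_of_length_le (by simp [List.length_drop])]
    constructor
    · intro hd; exact List.suffix_iff_eq_drop.mpr hd.symm
    · intro hs; exact (List.suffix_iff_eq_drop.mp hs).symm
  · have hneg : -(t.length : Int) < 0 := by omega
    rw [if_pos hneg, if_pos (by omega)]
    simp only [List.drop_zero]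
    rw [List.take_of_length_le (by omega)]
    constructor
    · intro he; exact absurd (congrArg List.length he) (by omega)
    · intro hs; exact absurd (List.IsSuffix.length_le hs) (by omega)

-- B's candidate list holds exactly the dot-suffixes of the filename.
theorem mem_autoCands_iff (L t : List Char) :
    t ∈ autoCands L ↔ ('.' :: t) <:+ L := by
  unfold autoCands
  rw [List.mem_filterMap]
  constructor
  · rintro ⟨⟨i, c⟩, hmem, hf⟩
    rw [PySem.List.mem_enumerate_iff] at hmem
    obtain ⟨k, hk, hp⟩ := hmem
    obtain ⟨hi, hc⟩ : (i = (k : Int) ∧ c = L[k]) := by simpa using hp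
    subst hi hc
    by_cases hdot : L[k] = '.'
    · rw [if_pos hdot] at hf
      have hslice : PySem.List.slice L (some ((k : Int) + 1)) none = L.drop (k+1) := by
        rw [PySem.List.slice_from L (by omega)]
        norm_num
      rw [hslice] at hf
      obtain rfl : L.drop (k+1) = t := by simpa using hf
      have : L.drop k = L[k] :: L.drop (k+1) := List.drop_eq_getElem_cons hk
      rw [hdot] at this
      exact this ▸ (List.drop_suffix k L)
    · rw [if_neg hdot] at hf; simp at hf
  · rintro ⟨pre, hpre⟩
    refine ⟨((pre.length : Int), '.'), ?_, ?_⟩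
    · rw [PySem.List.mem_enumerate_iff]
      refine ⟨pre.length, by rw [← hpre]; simp, ?_⟩
      have hlen : pre.length < L.length := by rw [← hpre]; simp
      have : L[pre.length]'hlen = '.' := by
        subst hpre; simp
      simp [this]
    · rw [if_pos rfl]
      rw [PySem.List.slice_from L (by omega)]
      have : ((pre.length : Int) + 1).toNat = pre.length + 1 := by omega
      rw [this, ← hpre]
      simp [List.drop_append]

-- A's loop is the first candidate passing the suffix test.
theorem autoFtLoop_eq_find (L : List Char) (fts : List String) :
    autoFtLoop L fts = (fts.find? (fun ft => decide (('.' :: ft.toList) <:+ L))).getD "" := by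
  induction fts with
  | nil => rfl
  | cons ft rest ih =>
    rw [autoFtLoop, List.find?_cons]
    have harg : -(PySem.Str.len ft + 1) = -((('.' :: ft.toList).length : Int)) := by
      rw [PySem.Str.len_eq]; simp
    rw [harg]
    by_cases h : ('.' :: ft.toList) <:+ L
    · rw [if_pos ((slice_neg_eq_iff L _ (by simp)).mpr h)]
      simp [h]
    · rw [if_neg (fun hc => h ((slice_neg_eq_iff L _ (by simp)).mp hc))]
      simp [h, ih]

-- core: A's loop result equals B's min-index selection.
theorem loop_eq_best (L : List Char) (fts : List String) :
    autoFtLoop L fts =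
      (match autoBest fts (autoCands L) with
       | some i => fts.getD i ""
       | none => "") := by
  rw [autoFtLoop_eq_find]
  unfold autoBest
  cases hf : fts.find? (fun ft => decide (('.' :: ft.toList) <:+ L)) with
  | none =>
    have hnil : (autoCands L).filterMap (fun ext =>
        if String.ofList ext ∈ fts then PySem.List.index? fts (String.ofList ext)
        else none) = [] := by
      rw [List.filterMap_eq_nil_iff]
      intro ext hext
      rw [if_neg]
      intro hmem
      have hq := List.find?_eq_none.mp hf _ hmem
      simp only [String.toList_ofList, decide_eq_true_eq] at hq
      exact hq ((mem_autoCands_iff L ext).mp hext)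
    rw [hnil]
    rfl
  | some ft₀ =>
    obtain ⟨hq, k₀, hk₀, hget, hmin⟩ := List.find?_eq_some_iff_getElem.mp hf
    simp only [decide_eq_true_eq] at hq
    have hmem₀ : ft₀ ∈ fts := hget ▸ List.getElem_mem hk₀
    obtain ⟨j, hj⟩ := Option.isSome_iff_exists.mp (List.isSome_idxOf?.mpr hmem₀)
    obtain ⟨hjlt, hjget, hjmin⟩ := List.idxOf?_eq_some_iff.mp hj
    have hjk : j = k₀ := by
      rcases Nat.lt_trichotomy j k₀ with h | h | h
      · have hc := hmin j h
        rw [hjget] at hc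
        simp only [Bool.not_eq_true', decide_eq_false_iff_not] at hc
        exact absurd hq hc
      · exact h
      · exact absurd hget (hjmin k₀ h)
    subst hjk
    have hminq : ((autoCands L).filterMap (fun ext =>
        if String.ofList ext ∈ fts then PySem.List.index? fts (String.ofList ext)
        else none)).min? = some j := by
      rw [List.min?_eq_some_iff]
      constructor
      · rw [List.mem_filterMap]
        refine ⟨ft₀.toList, (mem_autoCands_iff L ft₀.toList).mpr hq, ?_⟩
        rw [String.ofList_toList, if_pos hmem₀]
        exact hj
      · intro b hb
        rw [List.mem_filterMap] at hb
        obtain ⟨ext, hce, hge⟩ := hb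
        by_cases hm : String.ofList ext ∈ fts
        · rw [if_pos hm] at hge
          obtain ⟨hblt, hbget, _⟩ := List.idxOf?_eq_some_iff.mp hge
          by_contra hlt
          push Not at hlt
          have := hmin b hlt
          simp only [Bool.not_eq_true', decide_eq_false_iff_not] at this
          exact this (by
            rw [hbget, String.toList_ofList]
            exact (mem_autoCands_iff L ext).mp hce)
        · rw [if_neg hm] at hge; simp at hge
    rw [hminq]
    simp only [Option.getD_some]
    rw [List.getD_eq_getElem _ _ hjlt, hjget]

-- ===== VERDICT (by name: the statement is the Claim_ definition above) =====
theorem auto_filetype_spec : Claim_equal_auto_filetype := by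
  intro filename filetype filetypes _ _
  unfold Spec_auto_filetype auto_filetype auto_filetype_alt
  by_cases h1 : filetype = ""
  · rw [if_pos h1, if_pos h1]
    by_cases h2 : PySem.Str.isIn "." filename = false
    · rw [if_pos h2, if_pos h2]
    · rw [if_neg h2, if_neg h2]
      rw [loop_eq_best filename.toList filetypes]
      cases h : autoBest filetypes (autoCands filename.toList)
      · simp [h1]
      · simp
  · rw [if_neg h1, if_neg h1]
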